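-- pv_equiv track=rewrite | github.com/Fercomp/Algorithms | Learning/Matrix/QueensReach(CCI).py | queensReach
-- ===== SOURCE A (Python) =====
-- def is_safe(n, m, i, j):
--     return 0 <= i < n and 0 <= j < m
--
-- def mark_reachable_cells(result, r, c):
--     directions = [
--         [-1, 0], [1, 0], [0, 1], [0, -1], # Horizontal / Vertical
--         [-1, -1], [1, -1], [-1, 1], [1, 1] # Diognal
--         ]
--
--     n = len(result)
--     m = len(result[0])
--     result[r][c] = 1
--     for dir in directions:
--         x = r + dir[0]
--         y = c + dir[1]
--         while is_safe(n, m, x, y):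
--             result[x][y] = 1
--             x += dir[0]
--             y += dir[1]
--
-- def queensReach(board):
--     n = len(board)
--     m = len(board[0])
--
--     result = [[0] * m for _ in range(n)]
--
--     for i in range(n):
--         for j in range(m):
--             if board[i][j] == 1:
--                 mark_reachable_cells(result, i, j)
--
--     return result
-- ===== SOURCE B (Python) =====
-- def queensReach(board):
--     n = len(board)
--     m = len(board[0])
--     rows, cols, diags, antis = set(), set(), set(), set()
--     for i in range(n):
--         for j in range(m):
--             if board[i][j] == 1:
--                 rows.add(i)
--                 cols.add(j)
--                 diags.add(i - j)
--                 antis.add(i + j)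
--     return [[1 if (i in rows or j in cols or (i - j) in diags or (i + j) in antis) else 0
--              for j in range(m)]
--             for i in range(n)]
-- ===== Notes on version B (the rewrite author's own statement) =====
-- stated objective: alternative
-- what changed: Instead of walking rays in 8 directions from every queen, B records the rows, columns, diagonals and anti-diagonals that contain a queen in one pass and marks each cell by four set lookups.
import Mathlib
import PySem

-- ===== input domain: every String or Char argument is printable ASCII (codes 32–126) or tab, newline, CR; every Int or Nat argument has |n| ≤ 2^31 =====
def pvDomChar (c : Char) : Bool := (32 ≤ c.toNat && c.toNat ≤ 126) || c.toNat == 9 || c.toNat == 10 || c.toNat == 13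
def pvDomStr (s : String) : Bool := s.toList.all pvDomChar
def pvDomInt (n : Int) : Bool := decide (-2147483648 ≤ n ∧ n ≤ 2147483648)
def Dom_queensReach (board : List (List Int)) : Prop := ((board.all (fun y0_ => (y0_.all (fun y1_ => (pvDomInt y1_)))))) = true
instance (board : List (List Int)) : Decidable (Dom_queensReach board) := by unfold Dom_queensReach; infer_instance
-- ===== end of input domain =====

-- B replaces A's per-queen ray walks by four sets of the occupied rows / columns / diagonals /
-- anti-diagonals built in one pass, then marks each cell by set lookups (alternative algorithm;
-- not measured faster on the generated inputs). A mutates nothing observable to the caller;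
-- both build a fresh result grid.

-- ===== PORT A =====
def pvIsSafe (n m x y : Int) : Bool :=
  decide (0 ≤ x ∧ x < n ∧ 0 ≤ y ∧ y < m)

-- result[x][y] = 1 (x, y already checked in range by is_safe / the loop bounds)
def pvSet2 (g : List (List Int)) (x y : Nat) : List (List Int) :=
  g.set x ((g.getD x []).set y 1)

-- the 'while is_safe: mark; step' loop; fuel only makes it structural (never exhausted: each
-- iteration moves one coordinate monotonically, so at most n+m safe steps exist)
def pvMarkRay (n m dx dy : Int) : Nat → List (List Int) → Int → Int → List (List Int)
  | 0, g, _, _ => g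
  | Nat.succ f, g, x, y =>
    if pvIsSafe n m x y then pvMarkRay n m dx dy f (pvSet2 g x.toNat y.toNat) (x + dx) (y + dy)
    else g

def pvDirections : List (Int × Int) :=
  [(-1, 0), (1, 0), (0, 1), (0, -1), (-1, -1), (1, -1), (-1, 1), (1, 1)]

def pvMarkCells (g : List (List Int)) (r c : Nat) : List (List Int) :=
  let n := g.length
  let m := (g.getD 0 []).length
  let g1 := pvSet2 g r c
  pvDirections.foldl
    (fun h d => pvMarkRay (n : Int) (m : Int) d.1 d.2 (n + m + 1) h ((r : Int) + d.1) ((c : Int) + d.2))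
    g1

def queensReach (board : List (List Int)) : List (List Int) :=
  let n := board.length
  let m := (board.getD 0 []).length
  (List.range n).foldl
    (fun g i =>
      (List.range m).foldl
        (fun g j => if (board.getD i []).getD j 0 == 1 then pvMarkCells g i j else g) g)
    (List.replicate n (List.replicate m 0))

-- ===== PORT B =====
def queensReach_alt (board : List (List Int)) : List (List Int) :=
  let n := board.length
  let m := (board.getD 0 []).length
  let st :=
    (List.range n).foldl
      (fun st i =>
        (List.range m).foldl
          (fun (st : PySem.Set Int × PySem.Set Int × PySem.Set Int × PySem.Set Int) j =>
            if (board.getD i []).getD j 0 == 1 then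
              (PySem.Set.add st.1 (i : Int), PySem.Set.add st.2.1 (j : Int),
               PySem.Set.add st.2.2.1 ((i : Int) - (j : Int)),
               PySem.Set.add st.2.2.2 ((i : Int) + (j : Int)))
            else st)
          st)
      ((PySem.Set.empty, PySem.Set.empty, PySem.Set.empty, PySem.Set.empty) :
        PySem.Set Int × PySem.Set Int × PySem.Set Int × PySem.Set Int)
  (List.range n).map (fun (i : Nat) =>
    (List.range m).map (fun (j : Nat) =>
      if PySem.Set.contains st.1 (i : Int) || PySem.Set.contains st.2.1 (j : Int) ||
         PySem.Set.contains st.2.2.1 ((i : Int) - (j : Int)) ||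
         PySem.Set.contains st.2.2.2 ((i : Int) + (j : Int)) then 1 else 0))

-- ===== PRECONDITION & SPEC =====
-- Pre_ excludes exactly the inputs where the Python raises IndexError: the empty board
-- (board[0]) and ragged boards with a row shorter than row 0 (board[i][j] for j < m).
def Pre_queensReach (board : List (List Int)) : Prop :=
  board ≠ [] ∧ ∀ row ∈ board, (board.headD []).length ≤ row.length
instance (board : List (List Int)) : Decidable (Pre_queensReach board) := by
  unfold Pre_queensReach; infer_instance
def pvWitness_queensReach : List (List Int) := [[1, 0, 0], [0, 0, 0], [0, 2, 0]]

def Spec_queensReach (board : List (List Int)) (out : List (List Int)) : Prop := out = queensReach_alt board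
instance (board : List (List Int)) (out : List (List Int)) : Decidable (Spec_queensReach board out) := by unfold Spec_queensReach; infer_instance

-- ===== CLAIM (what is proved, stated in full; the proofs are below) =====
def Claim_equal_queensReach : Prop := ∀ (board : List (List Int)), Dom_queensReach board → Pre_queensReach board → Spec_queensReach board (queensReach board)

-- ===== LEMMAS AND PROOFS =====

-- the grid is a full n × m rectangle
def pvRect (g : List (List Int)) (n m : Nat) : Prop :=
  g.length = n ∧ ∀ row ∈ g, row.length = m

def pvGet2 (g : List (List Int)) (x y : Nat) : Int := (g.getD x []).getD y 0

-- scan order of the queen loops, flattened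
def pvPairs (n m : Nat) : List (Nat × Nat) :=
  (List.range n).flatMap (fun i => (List.range m).map (fun j => (i, j)))

def pvCell (board : List (List Int)) (p : Nat × Nat) : Bool :=
  (board.getD p.1 []).getD p.2 0 == 1

-- (r,c) and (x,y) share a row, column, diagonal or anti-diagonal
def pvAl (r c x y : Int) : Prop := r = x ∨ c = y ∨ r - c = x - y ∨ r + c = x + y

def pvSafe (n m x y : Int) : Prop := 0 ≤ x ∧ x < n ∧ 0 ≤ y ∧ y < m

-- cell (x,y) is attacked by some queen of the board
def pvAtt (board : List (List Int)) (n m : Nat) (x y : Nat) : Prop :=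
  ∃ p ∈ pvPairs n m, pvCell board p = true ∧ pvAl (p.1 : Int) (p.2 : Int) (x : Int) (y : Int)

theorem pv_mem_pairs {n m : Nat} {p : Nat × Nat} : p ∈ pvPairs n m ↔ p.1 < n ∧ p.2 < m := by
  simp only [pvPairs, List.mem_flatMap, List.mem_map, List.mem_range]
  constructor
  · rintro ⟨i, hi, j, hj, rfl⟩; exact ⟨hi, hj⟩
  · rintro ⟨h1, h2⟩; exact ⟨p.1, h1, p.2, h2, rfl⟩

theorem pv_set2_rect {g : List (List Int)} {n m a b : Nat} (hg : pvRect g n m)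
    (ha : a < n) (hb : b < m) : pvRect (pvSet2 g a b) n m := by
  obtain ⟨hl, hrow⟩ := hg
  refine ⟨by simp [pvSet2, hl], ?_⟩
  intro row hrowmem
  rcases List.mem_or_eq_of_mem_set hrowmem with h | h
  · exact hrow _ h
  · subst h
    have : g.getD a [] ∈ g := by
      rw [List.getD_eq_getElem _ _ (by omega)]
      exact List.getElem_mem _
    rw [List.length_set]; exact hrow _ this

theorem pv_set2_get {g : List (List Int)} {n m a b : Nat} (hg : pvRect g n m)
    (ha : a < n) (hb : b < m) {x y : Nat} (hx : x < n) (hy : y < m) :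
    pvGet2 (pvSet2 g a b) x y = if x = a ∧ y = b then 1 else pvGet2 g x y := by
  obtain ⟨hl, hrow⟩ := hg
  have hag : a < g.length := by omega
  unfold pvGet2 pvSet2
  by_cases hxa : x = a
  · subst hxa
    have h1 : (g.set x ((g.getD x []).set b 1)).getD x [] = (g.getD x []).set b 1 := by
      rw [List.getD, List.getElem?_set_self hag]; rfl
    rw [h1]
    by_cases hyb : y = b
    · have hbg : b < (g.getD x []).length := by
        rw [List.getD_eq_getElem _ _ hag, hrow _ (List.getElem_mem _)]; exact hb
      rw [hyb, List.getD, List.getElem?_set_self hbg]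
      simp
    · have h2 : ((g.getD x []).set b 1).getD y 0 = (g.getD x []).getD y 0 := by
        rw [List.getD, List.getElem?_set_ne (by omega)]; rfl
      rw [h2, if_neg (by tauto)]
  · have h1 : (g.set a ((g.getD a []).set b 1)).getD x [] = g.getD x [] := by
      rw [List.getD, List.getElem?_set_ne (by omega)]; rfl
    rw [h1, if_neg (by tauto)]

-- what one ray march writes
def pvRayP (n m dx dy x0 y0 : Int) (fuel : Nat) (x y : Nat) : Prop :=
  ∃ k : Nat, k < fuel ∧ (x : Int) = x0 + k * dx ∧ (y : Int) = y0 + k * dy ∧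
    ∀ t : Nat, t ≤ k → pvSafe n m (x0 + t * dx) (y0 + t * dy)

theorem pv_markRay_rect {n m : Nat} {dx dy : Int} :
    ∀ (fuel : Nat) (g : List (List Int)) (x0 y0 : Int), pvRect g n m →
      pvRect (pvMarkRay (n : Int) (m : Int) dx dy fuel g x0 y0) n m := by
  intro fuel
  induction fuel with
  | zero => intro g x0 y0 hg; exact hg
  | succ f ih =>
    intro g x0 y0 hg
    by_cases hs : pvIsSafe (n : Int) (m : Int) x0 y0 = true
    · have hs' : 0 ≤ x0 ∧ x0 < (n : Int) ∧ 0 ≤ y0 ∧ y0 < (m : Int) := by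
        simpa [pvIsSafe] using hs
      simp only [pvMarkRay, hs, if_true]
      exact ih _ _ _ (pv_set2_rect hg (by omega) (by omega))
    · simp only [pvMarkRay, hs, if_false]
      exact hg

theorem pv_markRay_get {n m : Nat} {dx dy : Int} :
    ∀ (fuel : Nat) (g : List (List Int)) (x0 y0 : Int), pvRect g n m →
      ∀ x y : Nat, x < n → y < m →
        (pvRayP (n : Int) (m : Int) dx dy x0 y0 fuel x y →
          pvGet2 (pvMarkRay (n : Int) (m : Int) dx dy fuel g x0 y0) x y = 1) ∧
        (¬ pvRayP (n : Int) (m : Int) dx dy x0 y0 fuel x y →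
          pvGet2 (pvMarkRay (n : Int) (m : Int) dx dy fuel g x0 y0) x y = pvGet2 g x y) := by
  intro fuel
  induction fuel with
  | zero =>
    intro g x0 y0 hg x y hx hy
    exact ⟨fun ⟨k, hk, _⟩ => absurd hk (by omega), fun _ => rfl⟩
  | succ f ih =>
    intro g x0 y0 hg x y hx hy
    by_cases hs : pvSafe (n : Int) (m : Int) x0 y0
    · have hsb : pvIsSafe (n : Int) (m : Int) x0 y0 = true := by
        obtain ⟨a, b, c, d⟩ := hs; simp [pvIsSafe]; tauto
      have hs' : 0 ≤ x0 ∧ x0 < (n : Int) ∧ 0 ≤ y0 ∧ y0 < (m : Int) := hs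
      have hxn : x0.toNat < n := by omega
      have hym : y0.toNat < m := by omega
      have hg' : pvRect (pvSet2 g x0.toNat y0.toNat) n m := pv_set2_rect hg hxn hym
      have IH := ih (pvSet2 g x0.toNat y0.toNat) (x0 + dx) (y0 + dy) hg' x y hx hy
      have hiff : pvRayP (n : Int) (m : Int) dx dy x0 y0 (f + 1) x y ↔
          ((x = x0.toNat ∧ y = y0.toNat) ∨ pvRayP (n : Int) (m : Int) dx dy (x0 + dx) (y0 + dy) f x y) := by
        constructor
        · rintro ⟨k, hk, hxk, hyk, hsafe⟩
          cases k with
          | zero =>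
            left
            simp only [Nat.cast_zero, zero_mul, add_zero] at hxk hyk
            omega
          | succ k' =>
            right
            refine ⟨k', by omega, by push_cast at hxk ⊢; linear_combination hxk,
              by push_cast at hyk ⊢; linear_combination hyk, fun t ht => ?_⟩
            have := hsafe (t + 1) (by omega)
            have e1 : x0 + (t + 1 : Nat) * dx = x0 + dx + (t : Nat) * dx := by push_cast; ring
            have e2 : y0 + (t + 1 : Nat) * dy = y0 + dy + (t : Nat) * dy := by push_cast; ring
            rwa [e1, e2] at this
        · rintro (⟨hx0, hy0⟩ | ⟨k, hk, hxk, hyk, hsafe⟩)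
          · refine ⟨0, by omega, by simp; omega, by simp; omega, fun t ht => ?_⟩
            have : t = 0 := by omega
            subst this; simpa using hs
          · refine ⟨k + 1, by omega, by push_cast at hxk ⊢; linear_combination hxk,
              by push_cast at hyk ⊢; linear_combination hyk, fun t ht => ?_⟩
            cases t with
            | zero => simpa using hs
            | succ t' =>
              have := hsafe t' (by omega)
              have e1 : x0 + dx + (t' : Nat) * dx = x0 + (t' + 1 : Nat) * dx := by push_cast; ring
              have e2 : y0 + dy + (t' : Nat) * dy = y0 + (t' + 1 : Nat) * dy := by push_cast; ring
              rwa [e1, e2] at this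
      simp only [pvMarkRay, hsb, if_true]
      constructor
      · intro hP
        rcases hiff.mp hP with hcen | hP'
        · by_cases hP' : pvRayP (n : Int) (m : Int) dx dy (x0 + dx) (y0 + dy) f x y
          · exact IH.1 hP'
          · rw [IH.2 hP', pv_set2_get hg hxn hym hx hy, if_pos hcen]
        · exact IH.1 hP'
      · intro hP
        have hP' : ¬ pvRayP (n : Int) (m : Int) dx dy (x0 + dx) (y0 + dy) f x y :=
          fun h => hP (hiff.mpr (Or.inr h))
        have hcen : ¬ (x = x0.toNat ∧ y = y0.toNat) := fun h => hP (hiff.mpr (Or.inl h))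
        rw [IH.2 hP', pv_set2_get hg hxn hym hx hy, if_neg hcen]
    · have hsb : pvIsSafe (n : Int) (m : Int) x0 y0 = false := by
        simp [pvIsSafe, pvSafe] at hs ⊢; omega
      simp only [pvMarkRay, hsb, if_false]
      constructor
      · rintro ⟨k, hk, hxk, hyk, hsafe⟩
        exact absurd (by simpa using hsafe 0 (Nat.zero_le k)) hs
      · intro _; rfl

theorem pv_foldRay_rect {n m : Nat} (fuel r c : Nat) (ds : List (Int × Int)) :
    ∀ g, pvRect g n m →
      pvRect (ds.foldl (fun h d =>
        pvMarkRay (n : Int) (m : Int) d.1 d.2 fuel h ((r : Int) + d.1) ((c : Int) + d.2)) g) n m := by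
  induction ds with
  | nil => intro g hg; exact hg
  | cons d ds ih =>
    intro g hg
    exact ih _ (pv_markRay_rect fuel g _ _ hg)

theorem pv_markCells_eq {g : List (List Int)} {n m : Nat} (r c : Nat) (hg : pvRect g n m)
    (hn : 0 < n) :
    pvMarkCells g r c = pvDirections.foldl (fun h d =>
      pvMarkRay (n : Int) (m : Int) d.1 d.2 (n + m + 1) h ((r : Int) + d.1) ((c : Int) + d.2))
      (pvSet2 g r c) := by
  obtain ⟨hl, hrow⟩ := hg
  have hm : (g.getD 0 []).length = m := by
    rw [List.getD_eq_getElem _ _ (by omega)]; exact hrow _ (List.getElem_mem _)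
  simp only [pvMarkCells, hl, hm]

theorem pv_foldRay_get {n m : Nat} (fuel r c : Nat) (ds : List (Int × Int)) :
    ∀ g, pvRect g n m → ∀ x y : Nat, x < n → y < m →
      ((∃ d ∈ ds, pvRayP (n : Int) (m : Int) d.1 d.2 ((r : Int) + d.1) ((c : Int) + d.2) fuel x y) →
        pvGet2 (ds.foldl (fun h d =>
          pvMarkRay (n : Int) (m : Int) d.1 d.2 fuel h ((r : Int) + d.1) ((c : Int) + d.2)) g) x y = 1) ∧
      (¬ (∃ d ∈ ds, pvRayP (n : Int) (m : Int) d.1 d.2 ((r : Int) + d.1) ((c : Int) + d.2) fuel x y) →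
        pvGet2 (ds.foldl (fun h d =>
          pvMarkRay (n : Int) (m : Int) d.1 d.2 fuel h ((r : Int) + d.1) ((c : Int) + d.2)) g) x y =
        pvGet2 g x y) := by
  induction ds with
  | nil => intro g hg x y hx hy; exact ⟨by rintro ⟨d, hd, _⟩; simp at hd, fun _ => rfl⟩
  | cons d ds ih =>
    intro g hg x y hx hy
    have hg1 : pvRect (pvMarkRay (n : Int) (m : Int) d.1 d.2 fuel g ((r : Int) + d.1) ((c : Int) + d.2)) n m :=
      pv_markRay_rect fuel g _ _ hg
    have IH := ih _ hg1 x y hx hy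
    have hone := pv_markRay_get (dx := d.1) (dy := d.2) fuel g ((r : Int) + d.1) ((c : Int) + d.2) hg x y hx hy
    simp only [List.foldl_cons]
    constructor
    · rintro ⟨d', hd', hP⟩
      rcases List.mem_cons.mp hd' with rfl | hmem
      · by_cases hrest : ∃ e ∈ ds, pvRayP (n : Int) (m : Int) e.1 e.2 ((r : Int) + e.1) ((c : Int) + e.2) fuel x y
        · exact IH.1 hrest
        · rw [IH.2 hrest]; exact hone.1 hP
      · exact IH.1 ⟨d', hmem, hP⟩
    · intro hno
      have h1 : ¬ pvRayP (n : Int) (m : Int) d.1 d.2 ((r : Int) + d.1) ((c : Int) + d.2) fuel x y :=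
        fun h => hno ⟨d, List.mem_cons_self, h⟩
      have h2 : ¬ ∃ e ∈ ds, pvRayP (n : Int) (m : Int) e.1 e.2 ((r : Int) + e.1) ((c : Int) + e.2) fuel x y :=
        fun ⟨e, he, hP⟩ => hno ⟨e, List.mem_cons_of_mem _ he, hP⟩
      rw [IH.2 h2, hone.2 h1]

theorem pv_geom {n m r c x y : Nat} (hr : r < n) (hc : c < m) (hx : x < n) (hy : y < m) :
    ((x = r ∧ y = c) ∨
      (∃ d ∈ pvDirections,
        pvRayP (n : Int) (m : Int) d.1 d.2 ((r : Int) + d.1) ((c : Int) + d.2) (n + m + 1) x y)) ↔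
    pvAl (r : Int) (c : Int) (x : Int) (y : Int) := by
  constructor
  · rintro (⟨rfl, rfl⟩ | ⟨d, hd, k, hk, hxk, hyk, _⟩)
    · exact Or.inl rfl
    · simp only [pvDirections, List.mem_cons, List.not_mem_nil, or_false] at hd
      unfold pvAl
      rcases hd with rfl | rfl | rfl | rfl | rfl | rfl | rfl | rfl <;>
        simp only [mul_zero, mul_one, mul_neg_one] at hxk hyk <;> omega
  · intro hal
    by_cases hcen : x = r ∧ y = c
    · exact Or.inl hcen
    · right
      unfold pvAl at hal
      have hnm : (n : Int) = (n : Nat) := rfl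
      rcases hal with h | h | h | h
      · -- same row: r = x, so y ≠ c; move along (0, ±1)
        have hyc : y ≠ c := by omega
        by_cases hlt : c < y
        · exact ⟨(0, 1), by simp [pvDirections], y - c - 1, by omega,
            by simp only [mul_zero]; omega, by simp only [mul_one]; push_cast; omega,
            fun t ht => by simp only [pvSafe, mul_zero, mul_one]; push_cast; omega⟩
        · exact ⟨(0, -1), by simp [pvDirections], c - y - 1, by omega,
            by simp only [mul_zero]; omega, by simp only [mul_neg_one]; push_cast; omega,
            fun t ht => by simp only [pvSafe, mul_zero, mul_neg_one]; push_cast; omega⟩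
      · -- same column
        have hxr : x ≠ r := by omega
        by_cases hlt : r < x
        · exact ⟨(1, 0), by simp [pvDirections], x - r - 1, by omega,
            by simp only [mul_one]; push_cast; omega, by simp only [mul_zero]; omega,
            fun t ht => by simp only [pvSafe, mul_zero, mul_one]; push_cast; omega⟩
        · exact ⟨(-1, 0), by simp [pvDirections], r - x - 1, by omega,
            by simp only [mul_neg_one]; push_cast; omega, by simp only [mul_zero]; omega,
            fun t ht => by simp only [pvSafe, mul_zero, mul_neg_one]; push_cast; omega⟩
      · -- diagonal: x - r = y - c ≠ 0
        have hxr : x ≠ r := by omega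
        by_cases hlt : r < x
        · exact ⟨(1, 1), by simp [pvDirections], x - r - 1, by omega,
            by simp only [mul_one]; push_cast; omega, by simp only [mul_one]; push_cast; omega,
            fun t ht => by simp only [pvSafe, mul_one]; push_cast; omega⟩
        · exact ⟨(-1, -1), by simp [pvDirections], r - x - 1, by omega,
            by simp only [mul_neg_one]; push_cast; omega, by simp only [mul_neg_one]; push_cast; omega,
            fun t ht => by simp only [pvSafe, mul_neg_one]; push_cast; omega⟩
      · -- anti-diagonal: x - r = c - y ≠ 0
        have hxr : x ≠ r := by omega
        by_cases hlt : r < x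
        · exact ⟨(1, -1), by simp [pvDirections], x - r - 1, by omega,
            by simp only [mul_one]; push_cast; omega, by simp only [mul_neg_one]; push_cast; omega,
            fun t ht => by simp only [pvSafe, mul_one, mul_neg_one]; push_cast; omega⟩
        · exact ⟨(-1, 1), by simp [pvDirections], r - x - 1, by omega,
            by simp only [mul_neg_one]; push_cast; omega, by simp only [mul_one]; push_cast; omega,
            fun t ht => by simp only [pvSafe, mul_one, mul_neg_one]; push_cast; omega⟩

theorem pv_markCells_rect {g : List (List Int)} {n m r c : Nat} (hg : pvRect g n m)
    (hn : 0 < n) (hr : r < n) (hc : c < m) : pvRect (pvMarkCells g r c) n m := by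
  rw [pv_markCells_eq r c hg hn]
  exact pv_foldRay_rect _ _ _ _ _ (pv_set2_rect hg hr hc)

theorem pv_markCells_get {g : List (List Int)} {n m r c : Nat} (hg : pvRect g n m)
    (hn : 0 < n) (hr : r < n) (hc : c < m) {x y : Nat} (hx : x < n) (hy : y < m) :
    (pvAl (r : Int) (c : Int) (x : Int) (y : Int) → pvGet2 (pvMarkCells g r c) x y = 1) ∧
    (¬ pvAl (r : Int) (c : Int) (x : Int) (y : Int) →
      pvGet2 (pvMarkCells g r c) x y = pvGet2 g x y) := by
  rw [pv_markCells_eq r c hg hn]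
  have hg1 : pvRect (pvSet2 g r c) n m := pv_set2_rect hg hr hc
  have hfold := pv_foldRay_get (n + m + 1) r c pvDirections _ hg1 x y hx hy
  have hset := pv_set2_get hg hr hc hx hy
  constructor
  · intro hal
    rcases (pv_geom hr hc hx hy).mpr hal with hcen | hray
    · by_cases hrest : ∃ d ∈ pvDirections,
        pvRayP (n : Int) (m : Int) d.1 d.2 ((r : Int) + d.1) ((c : Int) + d.2) (n + m + 1) x y
      · exact hfold.1 hrest
      · rw [hfold.2 hrest, hset, if_pos hcen]
    · exact hfold.1 hray
  · intro hal
    have hcen : ¬ (x = r ∧ y = c) := fun h => hal ((pv_geom hr hc hx hy).mp (Or.inl h))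
    have hray : ¬ ∃ d ∈ pvDirections,
        pvRayP (n : Int) (m : Int) d.1 d.2 ((r : Int) + d.1) ((c : Int) + d.2) (n + m + 1) x y :=
      fun h => hal ((pv_geom hr hc hx hy).mp (Or.inr h))
    rw [hfold.2 hray, hset, if_neg hcen]

def pvStepA (board : List (List Int)) (g : List (List Int)) (p : Nat × Nat) : List (List Int) :=
  if pvCell board p then pvMarkCells g p.1 p.2 else g

def pvStepB (board : List (List Int))
    (st : PySem.Set Int × PySem.Set Int × PySem.Set Int × PySem.Set Int) (p : Nat × Nat) :
    PySem.Set Int × PySem.Set Int × PySem.Set Int × PySem.Set Int :=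
  if pvCell board p then
    (PySem.Set.add st.1 (p.1 : Int), PySem.Set.add st.2.1 (p.2 : Int),
     PySem.Set.add st.2.2.1 ((p.1 : Int) - (p.2 : Int)),
     PySem.Set.add st.2.2.2 ((p.1 : Int) + (p.2 : Int)))
  else st

theorem pv_queensFold_rect (board : List (List Int)) {n m : Nat} (hn : 0 < n) :
    ∀ P : List (Nat × Nat), (∀ p ∈ P, p.1 < n ∧ p.2 < m) →
      ∀ g, pvRect g n m → pvRect (P.foldl (pvStepA board) g) n m := by
  intro P
  induction P with
  | nil => intro _ g hg; exact hg
  | cons p P ih =>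
    intro hP g hg
    simp only [List.foldl_cons]
    refine ih (fun q hq => hP q (List.mem_cons_of_mem _ hq)) _ ?_
    unfold pvStepA
    split
    · exact pv_markCells_rect hg hn (hP p List.mem_cons_self).1 (hP p List.mem_cons_self).2
    · exact hg

theorem pv_queensFold_get (board : List (List Int)) {n m : Nat} (hn : 0 < n) :
    ∀ P : List (Nat × Nat), (∀ p ∈ P, p.1 < n ∧ p.2 < m) →
      ∀ g, pvRect g n m → ∀ x y : Nat, x < n → y < m →
        ((∃ p ∈ P, pvCell board p = true ∧ pvAl (p.1 : Int) (p.2 : Int) (x : Int) (y : Int)) →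
          pvGet2 (P.foldl (pvStepA board) g) x y = 1) ∧
        (¬ (∃ p ∈ P, pvCell board p = true ∧ pvAl (p.1 : Int) (p.2 : Int) (x : Int) (y : Int)) →
          pvGet2 (P.foldl (pvStepA board) g) x y = pvGet2 g x y) := by
  intro P
  induction P with
  | nil =>
    intro _ g hg x y hx hy
    exact ⟨by rintro ⟨p, hp, _⟩; simp at hp, fun _ => rfl⟩
  | cons p P ih =>
    intro hP g hg x y hx hy
    have hp := hP p List.mem_cons_self
    have hg1 : pvRect (pvStepA board g p) n m := by
      unfold pvStepA; split
      · exact pv_markCells_rect hg hn hp.1 hp.2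
      · exact hg
    have IH := ih (fun q hq => hP q (List.mem_cons_of_mem _ hq)) _ hg1 x y hx hy
    simp only [List.foldl_cons]
    constructor
    · rintro ⟨q, hq, hcell, hal⟩
      rcases List.mem_cons.mp hq with rfl | hmem
      · by_cases hrest : ∃ q ∈ P, pvCell board q = true ∧
          pvAl (q.1 : Int) (q.2 : Int) (x : Int) (y : Int)
        · exact IH.1 hrest
        · rw [IH.2 hrest]
          unfold pvStepA
          rw [if_pos hcell]
          exact (pv_markCells_get hg hn hp.1 hp.2 hx hy).1 hal
      · exact IH.1 ⟨q, hmem, hcell, hal⟩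
    · intro hno
      have h2 : ¬ ∃ q ∈ P, pvCell board q = true ∧
          pvAl (q.1 : Int) (q.2 : Int) (x : Int) (y : Int) :=
        fun ⟨q, hq, hc⟩ => hno ⟨q, List.mem_cons_of_mem _ hq, hc⟩
      rw [IH.2 h2]
      unfold pvStepA
      split
      · rename_i hcell
        exact (pv_markCells_get hg hn hp.1 hp.2 hx hy).2
          (fun hal => hno ⟨p, List.mem_cons_self, hcell, hal⟩)
      · rfl

theorem pv_stateFold_mem (board : List (List Int)) :
    ∀ (P : List (Nat × Nat)) st (z : Int),
      (z ∈ (P.foldl (pvStepB board) st).1 ↔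
        z ∈ st.1 ∨ ∃ p ∈ P, pvCell board p = true ∧ z = (p.1 : Int)) ∧
      (z ∈ (P.foldl (pvStepB board) st).2.1 ↔
        z ∈ st.2.1 ∨ ∃ p ∈ P, pvCell board p = true ∧ z = (p.2 : Int)) ∧
      (z ∈ (P.foldl (pvStepB board) st).2.2.1 ↔
        z ∈ st.2.2.1 ∨ ∃ p ∈ P, pvCell board p = true ∧ z = (p.1 : Int) - (p.2 : Int)) ∧
      (z ∈ (P.foldl (pvStepB board) st).2.2.2 ↔
        z ∈ st.2.2.2 ∨ ∃ p ∈ P, pvCell board p = true ∧ z = (p.1 : Int) + (p.2 : Int)) := by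
  intro P
  induction P with
  | nil => intro st z; simp
  | cons p P ih =>
    intro st z
    simp only [List.foldl_cons, List.exists_mem_cons_iff, pvStepB]
    by_cases hcell : pvCell board p = true
    · simp only [if_pos hcell]
      refine ⟨((ih _ z).1).trans ?_, ((ih _ z).2.1).trans ?_,
        ((ih _ z).2.2.1).trans ?_, ((ih _ z).2.2.2).trans ?_⟩ <;>
        · simp only [PySem.Set.mem_add, hcell]
          tauto
    · simp only [if_neg hcell]
      refine ⟨((ih _ z).1).trans ?_, ((ih _ z).2.1).trans ?_,
        ((ih _ z).2.2.1).trans ?_, ((ih _ z).2.2.2).trans ?_⟩ <;>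
        · constructor
          · tauto
          · rintro (h | ⟨hc, _⟩ | h) <;> tauto

theorem pv_init_rect (n m : Nat) : pvRect (List.replicate n (List.replicate m 0)) n m := by
  refine ⟨List.length_replicate, fun row hrow => ?_⟩
  rw [List.eq_of_mem_replicate hrow, List.length_replicate]

theorem pv_init_get (n m x y : Nat) (hx : x < n) :
    pvGet2 (List.replicate n (List.replicate m (0 : Int))) x y = 0 := by
  have h1 : (List.replicate n (List.replicate m (0 : Int))).getD x [] = List.replicate m 0 := by
    rw [List.getD_eq_getElem _ _ (by simpa using hx)]
    exact List.getElem_replicate _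
  show ((List.replicate n (List.replicate m (0 : Int))).getD x []).getD y 0 = 0
  rw [h1, List.getD]
  rcases Nat.lt_or_ge y m with h | h
  · rw [List.getElem?_replicate_of_lt h]; rfl
  · rw [List.getElem?_eq_none (by simpa using h)]; rfl

-- ===== VERDICT (by name: the statement is the Claim_ definition above) =====
theorem queensReach_spec : Claim_equal_queensReach := by
  intro board _ hpre
  obtain ⟨hne, hrows⟩ := hpre
  show queensReach board = queensReach_alt board
  unfold queensReach queensReach_alt
  set n := board.length with hn_def
  set m := (board.getD 0 []).length with hm_def
  have hn : 0 < n := List.length_pos_iff.mpr hne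
  have hA : (List.range n).foldl
      (fun g i => (List.range m).foldl
        (fun g j => if (board.getD i []).getD j 0 == 1 then pvMarkCells g i j else g) g)
      (List.replicate n (List.replicate m 0))
      = (pvPairs n m).foldl (pvStepA board) (List.replicate n (List.replicate m 0)) := by
    rw [pvPairs, List.foldl_flatMap]
    simp only [List.foldl_map]
    rfl
  have hB : (List.range n).foldl
      (fun st i => (List.range m).foldl
        (fun (st : PySem.Set Int × PySem.Set Int × PySem.Set Int × PySem.Set Int) j =>
          if (board.getD i []).getD j 0 == 1 then
            (PySem.Set.add st.1 (i : Int), PySem.Set.add st.2.1 (j : Int),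
             PySem.Set.add st.2.2.1 ((i : Int) - (j : Int)),
             PySem.Set.add st.2.2.2 ((i : Int) + (j : Int)))
          else st) st)
      ((PySem.Set.empty, PySem.Set.empty, PySem.Set.empty, PySem.Set.empty) :
        PySem.Set Int × PySem.Set Int × PySem.Set Int × PySem.Set Int)
      = (pvPairs n m).foldl (pvStepB board)
          (PySem.Set.empty, PySem.Set.empty, PySem.Set.empty, PySem.Set.empty) := by
    rw [pvPairs, List.foldl_flatMap]
    simp only [List.foldl_map]
    rfl
  simp only [hA, hB]
  set g := (pvPairs n m).foldl (pvStepA board) (List.replicate n (List.replicate m 0)) with hg_def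
  set st := (pvPairs n m).foldl (pvStepB board)
    (PySem.Set.empty, PySem.Set.empty, PySem.Set.empty, PySem.Set.empty) with hst_def
  have hPmem : ∀ p ∈ pvPairs n m, p.1 < n ∧ p.2 < m := fun p hp => pv_mem_pairs.mp hp
  have hrect : pvRect g n m :=
    pv_queensFold_rect board hn (pvPairs n m) hPmem _ (pv_init_rect n m)
  -- the cell condition of B, rewritten to the attack predicate
  have hcond : ∀ x y : Nat, x < n → y < m →
      ((PySem.Set.contains st.1 (x : Int) || PySem.Set.contains st.2.1 (y : Int) ||
        PySem.Set.contains st.2.2.1 ((x : Int) - (y : Int)) ||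
        PySem.Set.contains st.2.2.2 ((x : Int) + (y : Int))) = true ↔ pvAtt board n m x y) := by
    intro x y hx hy
    have h1 := pv_stateFold_mem board (pvPairs n m)
      (PySem.Set.empty, PySem.Set.empty, PySem.Set.empty, PySem.Set.empty)
    simp only [Bool.or_eq_true, PySem.Set.contains_iff]
    rw [(h1 ((x : Int))).1, (h1 ((y : Int))).2.1, (h1 ((x : Int) - (y : Int))).2.2.1,
        (h1 ((x : Int) + (y : Int))).2.2.2]
    simp only [PySem.Set.empty, List.not_mem_nil, false_or]
    unfold pvAtt pvAl
    constructor
    · rintro (((⟨p, hp, hc, hz⟩ | ⟨p, hp, hc, hz⟩) | ⟨p, hp, hc, hz⟩) | ⟨p, hp, hc, hz⟩) <;>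
        exact ⟨p, hp, hc, by omega⟩
    · rintro ⟨p, hp, hc, h | h | h | h⟩
      · exact Or.inl (Or.inl (Or.inl ⟨p, hp, hc, by omega⟩))
      · exact Or.inl (Or.inl (Or.inr ⟨p, hp, hc, by omega⟩))
      · exact Or.inl (Or.inr ⟨p, hp, hc, by omega⟩)
      · exact Or.inr ⟨p, hp, hc, by omega⟩
  -- elementwise equality
  apply List.ext_getElem
  · rw [hrect.1, List.length_map, List.length_range]
  · intro i hi hi'
    have hin : i < n := by rwa [hrect.1] at hi
    have hrowmem : g[i] ∈ g := List.getElem_mem _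
    have hrowlen : g[i].length = m := hrect.2 _ hrowmem
    rw [List.getElem_map, List.getElem_range]
    apply List.ext_getElem
    · rw [hrowlen, List.length_map, List.length_range]
    · intro j hj hj'
      have hjm : j < m := by rwa [hrowlen] at hj
      rw [List.getElem_map, List.getElem_range]
      have hget : pvGet2 g i j = g[i][j] := by
        unfold pvGet2
        rw [List.getD_eq_getElem _ _ hi, List.getD_eq_getElem _ _ hj]
      have hfold := pv_queensFold_get board hn (pvPairs n m) hPmem _
        (pv_init_rect n m) i j hin hjm
      by_cases hatt : pvAtt board n m i j
      · rw [← hget, hfold.1 (by unfold pvAtt at hatt; exact hatt)]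
        rw [if_pos ((hcond i j hin hjm).mpr hatt)]
      · rw [← hget, hfold.2 (by unfold pvAtt at hatt; exact hatt), pv_init_get n m i j hin]
        rw [if_neg (fun h => hatt ((hcond i j hin hjm).mp h))]
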